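-- pv_equiv track=rewrite | github.com/rsbohn/waffle8 | tools/man_to_tape.py | text_to_ascii_tape
-- ===== SOURCE A (Python) =====
-- from typing import List
--
-- def text_to_ascii_tape(text: str, tape_id: str = "MA") -> str:
--     """Convert text to ASCII papertape format with octal encoding."""
--     lines = text.split('\n')
--     tape_lines: List[str] = []
--
--     words_per_line = 64
--     line_num = 1
--
--     for text_line in lines:
--         # Convert each character to octal words (one ASCII char per word)
--         words: List[str] = []
--         for char in text_line:
--             ascii_val = ord(char) & 0xFF
--             words.append(f"{ascii_val:03o}")
--
--         # Add newline at end of each line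
--         words.append("012")  # \n in octal
--
--         # Output in chunks of words_per_line
--         for i in range(0, len(words), words_per_line):
--             chunk = words[i:i + words_per_line]
--             tape_line = f"{tape_id}{line_num:03o}: " + " ".join(chunk)
--             tape_lines.append(tape_line)
--             line_num += 1
--
--     return "\n".join(tape_lines)
-- ===== SOURCE B (Python) =====
-- def text_to_ascii_tape(text: str, tape_id: str = "MA") -> str:
--     """Single streaming pass: a running word buffer flushed at 64 words or end of text line."""
--     tape_lines = []
--     buf = []
--     line_num = 1
--
--     def flush():
--         nonlocal buf, line_num
--         tape_lines.append(f"{tape_id}{line_num:03o}: " + " ".join(buf))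
--         buf = []
--         line_num += 1
--
--     for text_line in text.split('\n'):
--         for char in text_line:
--             buf.append(f"{ord(char) & 0xFF:03o}")
--             if len(buf) == 64:
--                 flush()
--         buf.append("012")
--         if len(buf) == 64:
--             flush()
--         if buf:
--             flush()
--     return "\n".join(tape_lines)
-- ===== Notes on version B (the rewrite author's own statement) =====
-- stated objective: alternative
-- what changed: A materialises the full per-line words list and then slices it into 64-word chunks with range(); B is a single streaming pass that pushes each octal word into a running buffer and flushes it whenever it reaches 64 words or at end of the text line, with one global line counter.
import Mathlib
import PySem

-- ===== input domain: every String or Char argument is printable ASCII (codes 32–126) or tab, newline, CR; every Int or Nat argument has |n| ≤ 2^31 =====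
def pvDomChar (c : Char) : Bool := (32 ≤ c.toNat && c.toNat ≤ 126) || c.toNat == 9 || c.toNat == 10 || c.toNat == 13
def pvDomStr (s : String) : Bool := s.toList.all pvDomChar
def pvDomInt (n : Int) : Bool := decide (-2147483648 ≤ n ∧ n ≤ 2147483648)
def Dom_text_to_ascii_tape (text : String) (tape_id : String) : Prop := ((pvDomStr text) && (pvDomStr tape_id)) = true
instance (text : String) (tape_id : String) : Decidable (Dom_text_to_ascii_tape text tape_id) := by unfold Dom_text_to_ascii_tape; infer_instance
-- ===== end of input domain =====

-- B replaces A's per-line "build the whole words list, then slice it into 64-word chunks with range()"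
-- by one streaming pass with a running buffer flushed at 64 words or at end of text line (objective: alternative decomposition).

-- shared formatting helper: f"{n:03o}" for n ≥ 0 (octal digits, zero-padded to width 3) — exact for nonnegative n
def pvOct3 (n : Nat) : String :=
  let ds := Nat.toDigits 8 n
  String.ofList (List.replicate (3 - ds.length) '0' ++ ds)

-- shared: f"{tape_id}{line_num:03o}: " + " ".join(chunk)  (line_num is always ≥ 1 in both programs)
def pvFmtLine (tape_id : String) (n : Nat) (chunk : List String) : String :=
  tape_id ++ pvOct3 n ++ ": " ++ PySem.Str.join " " chunk

-- ===== PORT A =====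
-- body of A's inner "for i in range(0, len(words), 64)" loop
def pvAInner (tape_id : String) (words : List String) (st : List String × Nat) (i : Int) :
    List String × Nat :=
  let chunk := PySem.List.slice words (some i) (some (i + 64))
  let tape_line := pvFmtLine tape_id st.2 chunk
  (st.1 ++ [tape_line], st.2 + 1)

-- body of A's outer "for text_line in lines" loop; state = (tape_lines, line_num)
def pvALine (tape_id : String) (st : List String × Nat) (text_line : String) : List String × Nat :=
  let words := text_line.toList.foldl (fun ws c => ws ++ [pvOct3 (c.toNat &&& 255)]) []
  let words := words ++ ["012"]
  (PySem.List.pyRange 0 (PySem.List.len words) 64).foldl (pvAInner tape_id words) st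

def text_to_ascii_tape (text : String) (tape_id : String) : String :=
  -- lines = text.split('\n'): the separator "\n" is non-empty, so split? never returns none
  PySem.Str.join "\n"
    (((PySem.Str.split? text "\n").getD []).foldl (pvALine tape_id) (([] : List String), 1)).1

-- ===== PORT B =====
-- B's buffer push: append one word, flush when the buffer reaches 64 words; state = (tape_lines, buf, line_num)
def pvPush (tape_id : String) (st : List String × List String × Nat) (w : String) :
    List String × List String × Nat :=
  let buf := st.2.1 ++ [w]
  if buf.length = 64 then (st.1 ++ [pvFmtLine tape_id st.2.2 buf], [], st.2.2 + 1)
  else (st.1, buf, st.2.2)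

-- B's end-of-line "if buf: flush()"
def pvFlush (tape_id : String) (st : List String × List String × Nat) :
    List String × List String × Nat :=
  if st.2.1.isEmpty then st else (st.1 ++ [pvFmtLine tape_id st.2.2 st.2.1], [], st.2.2 + 1)

-- body of B's "for text_line in ..." loop
def pvBLine (tape_id : String) (st : List String × List String × Nat) (text_line : String) :
    List String × List String × Nat :=
  let st := text_line.toList.foldl (fun st c => pvPush tape_id st (pvOct3 (c.toNat &&& 255))) st
  let st := pvPush tape_id st "012"
  pvFlush tape_id st

def text_to_ascii_tape_alt (text : String) (tape_id : String) : String :=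
  PySem.Str.join "\n"
    (((PySem.Str.split? text "\n").getD []).foldl (pvBLine tape_id)
      (([] : List String), ([] : List String), 1)).1

-- ===== PRECONDITION & SPEC =====
def Spec_text_to_ascii_tape (text : String) (tape_id : String) (out : String) : Prop := out = text_to_ascii_tape_alt text tape_id
instance (text : String) (tape_id : String) (out : String) : Decidable (Spec_text_to_ascii_tape text tape_id out) := by unfold Spec_text_to_ascii_tape; infer_instance

-- ===== CLAIM (what is proved, stated in full; the proofs are below) =====
def Claim_equal_text_to_ascii_tape : Prop := ∀ (text : String) (tape_id : String), Dom_text_to_ascii_tape text tape_id → Spec_text_to_ascii_tape text tape_id (text_to_ascii_tape text tape_id)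

-- ===== LEMMAS AND PROOFS =====

-- the 64-word chunks of a word list, front to back
def pvChunks (ws : List String) : List (List String) :=
  if h : ws = [] then [] else ws.take 64 :: pvChunks (ws.drop 64)
termination_by ws.length
decreasing_by
  have := List.length_pos_of_ne_nil h
  simp [List.length_drop]; omega

-- format a list of chunks with consecutive line numbers starting at n
def pvNumbered (tid : String) : Nat → List (List String) → List String
  | _, [] => []
  | n, c :: cs => pvFmtLine tid n c :: pvNumbered tid (n + 1) cs

lemma pvChunks_nil : pvChunks [] = [] := by
  rw [pvChunks]; simp

lemma pvChunks_cons (ws : List String) (h : ws ≠ []) :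
    pvChunks ws = ws.take 64 :: pvChunks (ws.drop 64) := by
  rw [pvChunks]; simp [h]

lemma pvChunks_full (c ws : List String) (h : c.length = 64) :
    pvChunks (c ++ ws) = c :: pvChunks ws := by
  have hne : c ++ ws ≠ [] := by
    intro hc
    apply_fun List.length at hc
    simp [List.length_append, h] at hc
  rw [pvChunks_cons _ hne, List.take_left' h, List.drop_left' h]

lemma pvChunks_small (ws : List String) (h0 : ws ≠ []) (h : ws.length ≤ 64) :
    pvChunks ws = [ws] := by
  rw [pvChunks_cons _ h0, List.take_of_length_le h, List.drop_of_length_le h, pvChunks_nil]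

-- range(a, b, s) for positive s: empty / cons forms
lemma pvRange_nil_of_le (a b s : Int) (hs : 0 < s) (h : b ≤ a) :
    PySem.List.pyRange a b s = [] := by
  rw [PySem.List.pyRange_of_pos a b hs]; simp [not_lt.mpr h]

lemma pvRange_cons_of_pos (a b s : Int) (hs : 0 < s) (h : a < b) :
    PySem.List.pyRange a b s = a :: PySem.List.pyRange (a + s) b s := by
  rw [PySem.List.pyRange_of_pos a b hs, PySem.List.pyRange_of_pos (a + s) b hs]
  have h1 : (b - a + s - 1) / s = (b - a - 1) / s + 1 := by
    have : b - a + s - 1 = (b - a - 1) + 1 * s := by ring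
    rw [this, Int.add_mul_ediv_right _ _ (ne_of_gt hs)]
  have hge : 0 ≤ (b - a - 1) / s := Int.ediv_nonneg (by omega) (le_of_lt hs)
  have hcnt : ((b - a + s - 1) / s).toNat
      = (if a + s < b then ((b - (a + s) + s - 1) / s).toNat else 0) + 1 := by
    by_cases h2 : a + s < b
    · simp only [h2, if_pos]
      have : b - (a + s) + s - 1 = b - a - 1 := by ring
      rw [this, h1]; omega
    · have hlt : b - a - 1 < s := by omega
      have : (b - a - 1) / s = 0 := Int.ediv_eq_zero_of_lt (by omega) hlt
      simp only [h2, if_neg, not_false_iff]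
      rw [h1, this]; simp
  rw [if_pos h, hcnt, List.range_succ_eq_map]
  simp only [List.map_cons, List.map_map, Nat.cast_zero, mul_zero, add_zero]
  congr 1
  apply List.map_congr_left; intro k _; simp only [Function.comp]; push_cast; ring

-- A's chunk loop, started at index a with (full.drop a) still to emit
lemma pvA_loop (tid : String) (full : List String) :
    ∀ (k : Nat) (ws : List String), ws.length ≤ k → ∀ (a : Nat) (out : List String) (n : Nat),
    full.drop a = ws →
    (PySem.List.pyRange (a : Int) (PySem.List.len full) 64).foldl (pvAInner tid full) (out, n)
      = (out ++ pvNumbered tid n (pvChunks ws), n + (pvChunks ws).length) := by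
  intro k
  induction k with
  | zero =>
    intro ws hws a out n hdrop
    have hnil : ws = [] := List.eq_nil_of_length_eq_zero (by omega)
    subst hnil
    have hge : full.length ≤ a := by
      by_contra hlt
      have := congrArg List.length hdrop
      simp [List.length_drop] at this
      omega
    rw [PySem.List.len_eq, pvRange_nil_of_le _ _ _ (by norm_num) (by exact_mod_cast hge)]
    simp [pvChunks_nil, pvNumbered]
  | succ k ih =>
    intro ws hws a out n hdrop
    by_cases hnil : ws = []
    · subst hnil
      have hge : full.length ≤ a := by
        by_contra hlt
        have := congrArg List.length hdrop
        simp [List.length_drop] at this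
        omega
      rw [PySem.List.len_eq, pvRange_nil_of_le _ _ _ (by norm_num) (by exact_mod_cast hge)]
      simp [pvChunks_nil, pvNumbered]
    · have hlt : a < full.length := by
        by_contra hge
        have : full.drop a = [] := List.drop_eq_nil_of_le (by omega)
        simp [this] at hdrop; exact hnil hdrop
      rw [PySem.List.len_eq, pvRange_cons_of_pos _ _ _ (by norm_num) (by exact_mod_cast hlt)]
      rw [List.foldl_cons]
      have hslice : PySem.List.slice full (some (a : Int)) (some ((a : Int) + 64))
          = ws.take 64 := by
        have h64 : ((a : Int) + 64) = ((a : Int) + ((64 : Nat) : Int)) := by norm_num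
        rw [h64, PySem.List.slice_natCast_add, hdrop]
      have hstep : pvAInner tid full (out, n) (a : Int)
          = (out ++ [pvFmtLine tid n (ws.take 64)], n + 1) := by
        simp [pvAInner, hslice]
      rw [hstep]
      have hdrop' : full.drop (a + 64) = ws.drop 64 := by
        rw [← List.drop_drop, hdrop]
      have hlen' : (ws.drop 64).length ≤ k := by
        have := List.length_pos_of_ne_nil hnil
        simp [List.length_drop]; omega
      have hcast : ((a : Int) + 64) = (((a + 64 : Nat)) : Int) := by push_cast; ring
      rw [hcast, ← PySem.List.len_eq, ih (ws.drop 64) hlen' (a + 64) _ _ hdrop']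
      rw [pvChunks_cons ws hnil]
      simp [pvNumbered, List.append_assoc]
      omega

-- B's streaming pass over the remaining words, then the end-of-line flush
lemma pvB_loop (tid : String) :
    ∀ (ws buf out : List String) (n : Nat), buf.length < 64 →
    pvFlush tid (ws.foldl (pvPush tid) (out, buf, n))
      = (out ++ pvNumbered tid n (pvChunks (buf ++ ws)), [],
         n + (pvChunks (buf ++ ws)).length) := by
  intro ws
  induction ws with
  | nil =>
    intro buf out n hbuf
    simp only [List.foldl_nil, List.append_nil]
    by_cases hb : buf = []
    · subst hb; simp [pvFlush, pvChunks_nil, pvNumbered]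
    · rw [pvChunks_small buf hb (by omega)]
      simp [pvFlush, hb, pvNumbered, List.isEmpty_iff]
  | cons w ws ih =>
    intro buf out n hbuf
    simp only [List.foldl_cons]
    have hrw : buf ++ w :: ws = (buf ++ [w]) ++ ws := by simp
    by_cases hfull : (buf ++ [w]).length = 64
    · have hstep : pvPush tid (out, buf, n) w
          = (out ++ [pvFmtLine tid n (buf ++ [w])], [], n + 1) := by
        simp only [pvPush]; rw [if_pos hfull]
      rw [hstep, ih [] _ _ (by norm_num)]
      rw [hrw, pvChunks_full _ _ hfull]
      simp [pvNumbered, List.append_assoc]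
      omega
    · have hstep : pvPush tid (out, buf, n) w = (out, buf ++ [w], n) := by
        simp only [pvPush]; rw [if_neg hfull]
      have hlt : (buf ++ [w]).length < 64 := by
        simp only [List.length_append, List.length_cons, List.length_nil] at hfull ⊢
        omega
      rw [hstep, ih (buf ++ [w]) _ _ hlt, hrw]

-- the words list of one text line (chars as octal, then the trailing "012")
def pvWords (tl : String) : List String :=
  tl.toList.map (fun c => pvOct3 (c.toNat &&& 255)) ++ ["012"]

lemma pvALine_eq (tid : String) (st : List String × Nat) (tl : String) :
    pvALine tid st tl
      = (st.1 ++ pvNumbered tid st.2 (pvChunks (pvWords tl)),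
         st.2 + (pvChunks (pvWords tl)).length) := by
  obtain ⟨out, n⟩ := st
  show (PySem.List.pyRange 0 (PySem.List.len _) 64).foldl (pvAInner tid _) (out, n) = _
  rw [PySem.List.foldl_append_singleton_eq_map (fun c => pvOct3 (c.toNat &&& 255)) tl.toList []]
  have h0 : (0 : Int) = ((0 : Nat) : Int) := by norm_num
  rw [h0]
  exact pvA_loop tid _ (pvWords tl).length (pvWords tl) le_rfl 0 out n (by simp [pvWords])

lemma pvBLine_eq (tid : String) (out : List String) (n : Nat) (tl : String) :
    pvBLine tid (out, [], n) tl
      = (out ++ pvNumbered tid n (pvChunks (pvWords tl)), [],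
         n + (pvChunks (pvWords tl)).length) := by
  show pvFlush tid (pvPush tid (tl.toList.foldl (fun st c => pvPush tid st (pvOct3 (c.toNat &&& 255))) (out, [], n)) "012") = _
  have hmap : tl.toList.foldl (fun st c => pvPush tid st (pvOct3 (c.toNat &&& 255))) (out, [], n)
      = (tl.toList.map (fun c => pvOct3 (c.toNat &&& 255))).foldl (pvPush tid) (out, [], n) := by
    rw [List.foldl_map]
  rw [hmap]
  have hconcat : pvPush tid ((tl.toList.map (fun c => pvOct3 (c.toNat &&& 255))).foldl (pvPush tid) (out, [], n)) "012"
      = (pvWords tl).foldl (pvPush tid) (out, [], n) := by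
    rw [pvWords, List.foldl_append, List.foldl_cons, List.foldl_nil]
  rw [hconcat]
  exact pvB_loop tid (pvWords tl) [] out n (by norm_num)

lemma pvLines_eq (tid : String) :
    ∀ (lines : List String) (out : List String) (n : Nat),
    lines.foldl (pvBLine tid) (out, [], n)
      = ((lines.foldl (pvALine tid) (out, n)).1, [], (lines.foldl (pvALine tid) (out, n)).2) := by
  intro lines
  induction lines with
  | nil => intro out n; simp
  | cons tl rest ih =>
    intro out n
    rw [List.foldl_cons, List.foldl_cons, pvBLine_eq, pvALine_eq, ih]

-- ===== VERDICT (by name: the statement is the Claim_ definition above) =====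
theorem text_to_ascii_tape_spec : Claim_equal_text_to_ascii_tape := by
  intro text tape_id _
  show text_to_ascii_tape text tape_id = text_to_ascii_tape_alt text tape_id
  unfold text_to_ascii_tape text_to_ascii_tape_alt
  rw [pvLines_eq]
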